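-- pv_equiv track=rewrite | github.com/nehelgeson/MATH726Code | all_spanning_trees.py | is_spanning_tree
-- ===== SOURCE A (Python) =====
-- def is_spanning_tree(edges):
--     # given a edge list of length 4, is this a spanning tree?
--     # if this edge set connects all nodes, then yes
--     if len(edges) != 4: return False
--
--     # visited keeps track of where we've been
--     visited = [False for x in range(5)]
--     # nodes keeps track of where we are going
--     nodes = set()
--
--     # start at node 0
--     nodes.add(0)
--
--     # depth first search
--     while len(nodes) > 0:
--         current = nodes.pop()
--         visited[current] = True
--         for e in edges:
--             if e[0] == current:
--                 if not visited[e[1]]: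
--                     nodes.add(e[1])
--             elif e[1] == current:
--                 if not visited[e[0]]:
--                     nodes.add(e[0])
--
--     # did DFS visit every node? If no, return False
--     for i in visited:
--         if not i:
--             return False
--     return True
-- ===== SOURCE B (Python) =====
-- def is_spanning_tree(edges):
--     # 4-pass relaxation over a fixed node table instead of a DFS worklist
--     if len(edges) != 4: return False
--     reach = {i: i == 0 for i in range(5)}
--     for _ in range(4):
--         for a, b in edges:
--             ra, rb = reach[a], reach[b]
--             if ra or rb:
--                 reach[a] = reach[b] = True
--     return all(reach.values())
-- ===== Notes on version B (the rewrite author's own statement) =====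
-- stated objective: alternative
-- what changed: Replaces A's DFS with an explicit worklist set and visited array by four in-place relaxation passes over the edge list on a fixed {0..4} reach table (Bellman-Ford-style fixpoint instead of graph search).
-- outside the precondition, e.g. on is_spanning_tree([(0, 1), (1, 2), (2, 3), (5, 6)]): A returns False, B raises KeyError; on is_spanning_tree([(0, 1), (1, 2), (2, 3), (3, -1)]): A returns True, B raises KeyError
import Mathlib
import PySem

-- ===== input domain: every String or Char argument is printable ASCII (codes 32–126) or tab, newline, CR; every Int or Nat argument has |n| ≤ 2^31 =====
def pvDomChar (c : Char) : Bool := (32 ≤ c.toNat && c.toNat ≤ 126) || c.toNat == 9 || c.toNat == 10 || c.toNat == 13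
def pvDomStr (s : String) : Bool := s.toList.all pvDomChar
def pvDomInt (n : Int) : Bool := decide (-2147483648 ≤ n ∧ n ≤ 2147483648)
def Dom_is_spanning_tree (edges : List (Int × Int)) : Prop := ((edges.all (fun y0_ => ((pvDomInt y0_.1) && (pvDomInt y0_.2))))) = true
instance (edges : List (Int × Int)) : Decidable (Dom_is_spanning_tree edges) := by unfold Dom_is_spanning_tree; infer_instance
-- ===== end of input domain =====

-- B replaces A's DFS worklist by a 4-pass edge relaxation over a fixed node table (alternative algorithm, same cost).

-- ===== PORT A =====
-- visited[i] read, total form: exact wherever Python does not raise IndexError (Pre_ keeps indices in range)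
def visGet (v : List Bool) (i : Int) : Bool := (PySem.List.pyGet? v i).getD false

-- the inner 'for e in edges' loop collecting unvisited neighbours of `current` into the worklist set
def dfsNbrs (edges : List (Int × Int)) (v : List Bool) (c : Int) (acc : PySem.Set Int) : PySem.Set Int :=
  edges.foldl (fun ns e =>
    if e.1 == c then (if !(visGet v e.2) then PySem.Set.add ns e.2 else ns)
    else if e.2 == c then (if !(visGet v e.1) then PySem.Set.add ns e.1 else ns)
    else ns) acc

-- the 'while len(nodes) > 0' loop; nodes.pop() is modelled as taking the head of the set's
-- element list (Python's pop order is unspecified; the resulting visited array is the same for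
-- every order). The fuel argument only makes the recursion structural: inside Pre_ the loop
-- pops at most 5 nodes, so fuel 16 is never exhausted.
def dfsLoop (edges : List (Int × Int)) : Nat → PySem.Set Int → List Bool → List Bool
  | 0, _, v => v
  | _ + 1, [], v => v
  | fuel + 1, c :: rest, v =>
    let v' := PySem.List.pySetD v c true        -- visited[current] = True (exact inside Pre_)
    dfsLoop edges fuel (dfsNbrs edges v' c rest) v'

def is_spanning_tree (edges : List (Int × Int)) : Bool :=
  if edges.length != 4 then false
  else
    let visited := (PySem.List.pyRange 0 5 1).map (fun _ => false)
    let visited := dfsLoop edges 16 (PySem.Set.add PySem.Set.empty 0) visited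
    visited.all (fun i => i)

-- ===== PORT B =====
-- one 'for a, b in edges' pass; the reach[a] / reach[b] reads are exact inside Pre_ (keys
-- present; Python raises KeyError otherwise, and Pre_ excludes exactly those inputs)
def relaxPass (edges : List (Int × Int)) (r : PySem.Dict Int Bool) : PySem.Dict Int Bool :=
  edges.foldl (fun r e =>
    let ra := r.getD e.1 false
    let rb := r.getD e.2 false
    if ra || rb then (r.insert e.1 true).insert e.2 true else r) r

def is_spanning_tree_alt (edges : List (Int × Int)) : Bool :=
  if edges.length != 4 then false
  else
    let reach : PySem.Dict Int Bool :=
      (PySem.List.pyRange 0 5 1).foldl (fun d i => d.insert i (i == 0)) PySem.Dict.empty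
    let reach := (PySem.List.pyRange 0 4 1).foldl (fun r _ => relaxPass edges r) reach
    (PySem.Dict.values reach).all (fun b => b)

-- ===== PRECONDITION & SPEC =====
def pvNodes : List Int := [0, 1, 2, 3, 4]

-- Pre_ excludes length-4 edge lists carrying a node label outside 0..4: there A raises
-- IndexError when such a label is reached from node 0, returns False when it is unreachable,
-- and on negative labels relies on accidental negative-index wraparound, while B raises
-- KeyError on every such list.
def Pre_is_spanning_tree (edges : List (Int × Int)) : Prop :=
  edges.length ≠ 4 ∨ ∀ e ∈ edges, e.1 ∈ pvNodes ∧ e.2 ∈ pvNodes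
instance (edges : List (Int × Int)) : Decidable (Pre_is_spanning_tree edges) := by
  unfold Pre_is_spanning_tree; infer_instance

def pvWitness_is_spanning_tree : (List (Int × Int)) := [(0, 1), (1, 2), (2, 3), (3, 4)]

def Spec_is_spanning_tree (edges : List (Int × Int)) (out : Bool) : Prop := out = is_spanning_tree_alt edges
instance (edges : List (Int × Int)) (out : Bool) : Decidable (Spec_is_spanning_tree edges out) := by
  unfold Spec_is_spanning_tree; infer_instance

-- ===== CLAIM (what is proved, stated in full; the proofs are below) =====
def Claim_equal_is_spanning_tree : Prop := ∀ (edges : List (Int × Int)), Dom_is_spanning_tree edges → Pre_is_spanning_tree edges → Spec_is_spanning_tree edges (is_spanning_tree edges)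

-- ===== LEMMAS AND PROOFS =====

-- the undirected adjacency relation of the edge list, and reachability from node 0
def Adj (E : List (Int × Int)) (x y : Int) : Prop :=
  ∃ e ∈ E, (e.1 = x ∧ e.2 = y) ∨ (e.1 = y ∧ e.2 = x)

def Reach (E : List (Int × Int)) : Int → Int → Prop := Relation.ReflTransGen (Adj E)

-- all node labels of the edge list lie in 0..4 (the in-range half of Pre_)
def HK (E : List (Int × Int)) : Prop := ∀ e ∈ E, e.1 ∈ pvNodes ∧ e.2 ∈ pvNodes

lemma adj_symm {E : List (Int × Int)} {x y : Int} (h : Adj E x y) : Adj E y x := by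
  obtain ⟨e, he, h⟩ := h; exact ⟨e, he, by tauto⟩

lemma mem_pvNodes_iff {x : Int} : x ∈ pvNodes ↔ 0 ≤ x ∧ x < 5 := by
  simp [pvNodes]; omega

lemma adj_mem_right {E : List (Int × Int)} (hK : HK E) {x y : Int} (h : Adj E x y) :
    y ∈ pvNodes := by
  obtain ⟨e, he, h⟩ := h
  rcases h with ⟨_, h2⟩ | ⟨h1, _⟩
  · exact h2 ▸ (hK e he).2
  · exact h1 ▸ (hK e he).1

lemma reach_mem {E : List (Int × Int)} (hK : HK E) {x : Int} (h : Reach E 0 x) :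
    x ∈ pvNodes := by
  induction h with
  | refl => decide
  | tail _ hadj _ => exact adj_mem_right hK hadj

lemma visGet_eq {v : List Bool} {x : Int} (hx : 0 ≤ x) :
    visGet v x = (v[x.toNat]?).getD false := by
  rw [visGet, PySem.List.pyGet?_of_nonneg v hx]

-- a strict counting lemma shared by the DFS termination measure and B's pigeonhole argument
lemma countP_strict {l : List Int} {f g : Int → Bool}
    (hmono : ∀ x ∈ l, f x = true → g x = true) {c : Int}
    (hc : c ∈ l) (hfc : f c = false) (hgc : g c = true) :
    l.countP f < l.countP g := by
  obtain ⟨l1, l2, rfl⟩ := List.append_of_mem hc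
  have h1 : l1.countP f ≤ l1.countP g :=
    List.countP_mono_left (fun x hx => hmono x (by simp [hx]))
  have h2 : l2.countP f ≤ l2.countP g :=
    List.countP_mono_left (fun x hx => hmono x (by simp [hx]))
  simp only [List.countP_append, List.countP_cons, hfc, hgc]
  simp; omega

-- ---------- the A side: the DFS worklist computes exactly the reachable set ----------

def unvisCount (v : List Bool) : Nat := pvNodes.countP (fun x => !(visGet v x))

structure DfsInv (E : List (Int × Int)) (ns : List Int) (v : List Bool) : Prop where
  len : v.length = 5
  nodup : ns.Nodup
  mem : ∀ c ∈ ns, c ∈ pvNodes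
  unvis : ∀ c ∈ ns, visGet v c = false
  sound_ns : ∀ c ∈ ns, Reach E 0 c
  sound_v : ∀ x ∈ pvNodes, visGet v x = true → Reach E 0 x
  frontier : ∀ x ∈ pvNodes, visGet v x = true → ∀ y, Adj E x y → (visGet v y = true ∨ y ∈ ns)
  zero : visGet v 0 = true ∨ 0 ∈ ns

lemma visGet_set_self {v : List Bool} {c : Int} (hlen : v.length = 5) (hc : c ∈ pvNodes) :
    visGet (PySem.List.pySetD v c true) c = true := by
  obtain ⟨h0, h5⟩ := mem_pvNodes_iff.mp hc
  rw [PySem.List.pySetD_of_nonneg v true h0, visGet_eq h0]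
  rw [List.getElem?_set_self (by omega)]
  rfl

lemma visGet_set_ne {v : List Bool} {c x : Int} (hc : 0 ≤ c) (hx : 0 ≤ x) (hne : x ≠ c) :
    visGet (PySem.List.pySetD v c true) x = visGet v x := by
  rw [PySem.List.pySetD_of_nonneg v true hc, visGet_eq hx, visGet_eq hx]
  rw [List.getElem?_set_ne (by omega)]

-- which labels one step of the inner loop may add
def NbCond (v : List Bool) (c : Int) (e : Int × Int) (y : Int) : Prop :=
  ((e.1 = c ∧ e.2 = y) ∨ (¬ e.1 = c ∧ e.2 = c ∧ e.1 = y)) ∧ visGet v y = false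

lemma mem_dfsNbrs {E : List (Int × Int)} {v : List Bool} {c y : Int} :
    ∀ {acc : PySem.Set Int}, y ∈ dfsNbrs E v c acc ↔
      y ∈ acc ∨ ∃ e ∈ E, NbCond v c e y := by
  induction E with
  | nil => simp [dfsNbrs]
  | cons e E ih =>
    intro acc
    show y ∈ dfsNbrs E v c _ ↔ _
    rw [ih]
    have step : (y ∈ (if e.1 == c then (if !(visGet v e.2) then PySem.Set.add acc e.2 else acc)
        else if e.2 == c then (if !(visGet v e.1) then PySem.Set.add acc e.1 else acc)
        else acc)) ↔ (y ∈ acc ∨ NbCond v c e y) := by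
      unfold NbCond
      split_ifs with h1 h2 h3 h4
      · rw [beq_iff_eq] at h1; rw [Bool.not_eq_true'] at h2
        rw [PySem.Set.mem_add]
        constructor
        · rintro (h | rfl)
          · exact Or.inl h
          · exact Or.inr ⟨Or.inl ⟨h1, rfl⟩, h2⟩
        · rintro (h | ⟨⟨_, rfl⟩ | ⟨hne, _, _⟩, hv⟩)
          · exact Or.inl h
          · exact Or.inr rfl
          · exact absurd h1 hne
      · rw [beq_iff_eq] at h1
        rw [Bool.not_eq_true', Bool.not_eq_false] at h2
        constructor
        · exact Or.inl
        · rintro (h | ⟨⟨_, rfl⟩ | ⟨hne, _, _⟩, hv⟩)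
          · exact h
          · exact absurd h2 (by simp [hv])
          · exact absurd h1 hne
      · rw [beq_iff_eq] at h3; rw [Bool.not_eq_true'] at h4
        rw [beq_iff_eq] at h1 -- h1 : ¬ e.1 = c
        rw [PySem.Set.mem_add]
        constructor
        · rintro (h | rfl)
          · exact Or.inl h
          · exact Or.inr ⟨Or.inr ⟨h1, h3, rfl⟩, h4⟩
        · rintro (h | ⟨⟨he1, _⟩ | ⟨_, _, rfl⟩, hv⟩)
          · exact Or.inl h
          · exact absurd he1 h1
          · exact Or.inr rfl
      · rw [beq_iff_eq] at h1 h3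
        rw [Bool.not_eq_true', Bool.not_eq_false] at h4
        constructor
        · exact Or.inl
        · rintro (h | ⟨⟨he1, _⟩ | ⟨_, _, rfl⟩, hv⟩)
          · exact h
          · exact absurd he1 h1
          · exact absurd h4 (by simp [hv])
      · rw [beq_iff_eq] at h1; rw [beq_iff_eq] at h3
        constructor
        · exact Or.inl
        · rintro (h | ⟨⟨he1, _⟩ | ⟨_, he2, _⟩, hv⟩)
          · exact h
          · exact absurd he1 h1
          · exact absurd he2 h3
    rw [step]
    simp only [List.mem_cons]
    constructor
    · rintro ((h | h) | h)
      · exact Or.inl h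
      · exact Or.inr ⟨e, Or.inl rfl, h⟩
      · obtain ⟨e', he', hc'⟩ := h; exact Or.inr ⟨e', Or.inr he', hc'⟩
    · rintro (h | ⟨e', (rfl | he'), hc'⟩)
      · exact Or.inl (Or.inl h)
      · exact Or.inl (Or.inr hc')
      · exact Or.inr ⟨e', he', hc'⟩

lemma nodup_dfsNbrs {E : List (Int × Int)} {v : List Bool} {c : Int} :
    ∀ {acc : PySem.Set Int}, acc.Nodup → (dfsNbrs E v c acc).Nodup := by
  induction E with
  | nil => intro acc h; simpa [dfsNbrs] using h
  | cons e E ih =>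
    intro acc h
    show (dfsNbrs E v c _).Nodup
    apply ih
    dsimp only
    split_ifs <;> first | exact h | exact PySem.Set.nodup_add _ _ h

lemma dfsInv_step {E : List (Int × Int)} (hK : HK E) {c : Int} {rest : List Int} {v : List Bool}
    (h : DfsInv E (c :: rest) v) :
    DfsInv E (dfsNbrs E (PySem.List.pySetD v c true) c rest) (PySem.List.pySetD v c true) := by
  have hc : c ∈ pvNodes := h.mem c (by simp)
  obtain ⟨hc0, hc5⟩ := mem_pvNodes_iff.mp hc
  set v' := PySem.List.pySetD v c true with hv'
  have hlen' : v'.length = 5 := by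
    rw [hv', PySem.List.pySetD_of_nonneg v true hc0, List.length_set]; exact h.len
  have hget : ∀ x : Int, x ∈ pvNodes → visGet v' x = if x = c then true else visGet v x := by
    intro x hx
    obtain ⟨hx0, _⟩ := mem_pvNodes_iff.mp hx
    by_cases hxc : x = c
    · rw [if_pos hxc, hxc, hv']; exact visGet_set_self h.len hc
    · rw [if_neg hxc, hv']; exact visGet_set_ne hc0 hx0 hxc
  have hmono : ∀ x : Int, x ∈ pvNodes → visGet v x = true → visGet v' x = true := by
    intro x hx hvx
    rw [hget x hx]; split <;> simp [hvx]
  have hrest_mem : ∀ y ∈ rest, y ∈ pvNodes := fun y hy => h.mem y (by simp [hy])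
  have hrest_ne : ∀ y ∈ rest, y ≠ c := by
    intro y hy hyc
    exact (List.nodup_cons.mp h.nodup).1 (hyc ▸ hy)
  have hreach_c : Reach E 0 c := h.sound_ns c (by simp)
  have hcond_adj : ∀ e ∈ E, ∀ y, NbCond v' c e y → Adj E c y := by
    rintro e he y ⟨hcy, _⟩
    rcases hcy with ⟨h1, h2⟩ | ⟨_, h2, h1⟩
    · exact ⟨e, he, Or.inl ⟨h1, h2⟩⟩
    · exact ⟨e, he, Or.inr ⟨h1, h2⟩⟩
  constructor
  · exact hlen'
  · exact nodup_dfsNbrs (List.nodup_cons.mp h.nodup).2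
  · -- mem
    intro y hy
    rcases mem_dfsNbrs.mp hy with hy | ⟨e, he, hcond⟩
    · exact hrest_mem y hy
    · exact adj_mem_right hK (hcond_adj e he y hcond)
  · -- unvis
    intro y hy
    rcases mem_dfsNbrs.mp hy with hy | ⟨e, he, hcond⟩
    · rw [hget y (hrest_mem y hy)]
      simp [hrest_ne y hy, h.unvis y (by simp [hy])]
    · exact hcond.2
  · -- sound_ns
    intro y hy
    rcases mem_dfsNbrs.mp hy with hy | ⟨e, he, hcond⟩
    · exact h.sound_ns y (by simp [hy])
    · exact Relation.ReflTransGen.tail hreach_c (hcond_adj e he y hcond)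
  · -- sound_v
    intro x hx hvx
    rw [hget x hx] at hvx
    by_cases hxc : x = c
    · exact hxc ▸ hreach_c
    · exact h.sound_v x hx (by simpa [hxc] using hvx)
  · -- frontier
    intro x hx hvx y hadj
    have hy : y ∈ pvNodes := adj_mem_right hK hadj
    obtain ⟨hy0, _⟩ := mem_pvNodes_iff.mp hy
    by_cases hyv : visGet v' y = true
    · exact Or.inl hyv
    · right
      have hyv' : visGet v' y = false := by revert hyv; cases visGet v' y <;> simp
      have hyc : y ≠ c := by
        intro hyc
        rw [hyc, hv', visGet_set_self h.len hc] at hyv'; exact absurd hyv' (by simp)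
      rw [hget x hx] at hvx
      by_cases hxc : x = c
      · -- y is an unvisited neighbour of c: the inner loop adds it
        subst hxc
        obtain ⟨e, he, hcy⟩ := hadj
        apply mem_dfsNbrs.mpr
        right
        refine ⟨e, he, ⟨?_, hyv'⟩⟩
        rcases hcy with ⟨h1, h2⟩ | ⟨h1, h2⟩
        · exact Or.inl ⟨h1, h2⟩
        · by_cases hec : e.1 = x
          · exact absurd (h1.symm.trans hec) hyc
          · exact Or.inr ⟨hec, h2, h1⟩
      · have hvx' : visGet v x = true := by simpa [hxc] using hvx
        rcases h.frontier x hx hvx' y hadj with hyo | hyo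
        · exact absurd (hmono y hy hyo) (by simp [hyv'])
        · rcases (List.mem_cons.mp hyo) with rfl | hyo
          · exact absurd rfl hyc
          · exact mem_dfsNbrs.mpr (Or.inl hyo)
  · -- zero
    rcases h.zero with hz | hz
    · exact Or.inl (hmono 0 (by decide) hz)
    · rcases List.mem_cons.mp hz with hz0 | hz
      · left; rw [hz0, hv']; exact visGet_set_self h.len hc
      · exact Or.inr (mem_dfsNbrs.mpr (Or.inl hz))

lemma unvisCount_step {v : List Bool} {c : Int} (hlen : v.length = 5) (hc : c ∈ pvNodes)
    (hcv : visGet v c = false) :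
    unvisCount (PySem.List.pySetD v c true) < unvisCount v := by
  obtain ⟨hc0, _⟩ := mem_pvNodes_iff.mp hc
  refine countP_strict ?_ hc ?_ ?_
  · intro x hx hfx
    obtain ⟨hx0, _⟩ := mem_pvNodes_iff.mp hx
    by_cases hxc : x = c
    · rw [hxc, visGet_set_self hlen hc] at hfx; simp at hfx
    · rwa [visGet_set_ne hc0 hx0 hxc] at hfx
  · simp [visGet_set_self hlen hc]
  · simp [hcv]

lemma dfsLoop_inv {E : List (Int × Int)} (hK : HK E) :
    ∀ (fuel : Nat) (ns : List Int) (v : List Bool),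
      DfsInv E ns v → unvisCount v < fuel → DfsInv E [] (dfsLoop E fuel ns v) := by
  intro fuel
  induction fuel with
  | zero => intro ns v _ hf; omega
  | succ f ih =>
    intro ns v h hf
    cases ns with
    | nil => exact h
    | cons c rest =>
      show DfsInv E [] (dfsLoop E f (dfsNbrs E _ c rest) _)
      have hc : c ∈ pvNodes := h.mem c (by simp)
      have hlt : unvisCount (PySem.List.pySetD v c true) < unvisCount v :=
        unvisCount_step h.len hc (h.unvis c (by simp))
      exact ih _ _ (dfsInv_step hK h) (by omega)

lemma dfs_final {E : List (Int × Int)} (hK : HK E) {v : List Bool} (h : DfsInv E [] v) :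
    ∀ x ∈ pvNodes, (visGet v x = true ↔ Reach E 0 x) := by
  intro x hx
  constructor
  · exact h.sound_v x hx
  · intro hr
    clear hx
    induction hr with
    | refl =>
      rcases h.zero with hz | hz
      · exact hz
      · simp at hz
    | @tail b c' hab hadj ih =>
      have hb : b ∈ pvNodes := reach_mem hK hab
      rcases h.frontier b hb ih c' hadj with hv | hv
      · exact hv
      · simp at hv

lemma all_iff_pvNodes {v : List Bool} (hlen : v.length = 5) :
    (v.all (fun i => i) = true) ↔ ∀ x ∈ pvNodes, visGet v x = true := by
  rw [List.all_eq_true]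
  constructor
  · intro hall x hx
    obtain ⟨hx0, hx5⟩ := mem_pvNodes_iff.mp hx
    rw [visGet_eq hx0]
    have hlt : x.toNat < v.length := by omega
    rw [List.getElem?_eq_getElem hlt]
    exact hall _ (List.getElem_mem hlt)
  · intro hall b hb
    obtain ⟨i, hi, rfl⟩ := List.mem_iff_getElem.mp hb
    have hx : (i : Int) ∈ pvNodes := mem_pvNodes_iff.mpr (by constructor <;> [omega; (push_cast; omega)])
    have := hall _ hx
    rw [visGet_eq (by omega)] at this
    simpa [List.getElem?_eq_getElem hi] using this

lemma A_char {E : List (Int × Int)} (hK : HK E) (hlen : E.length = 4) :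
    (is_spanning_tree E = true ↔ ∀ x ∈ pvNodes, Reach E 0 x) := by
  rw [is_spanning_tree, hlen]
  simp only [bne_self_eq_false, Bool.false_eq_true, if_false]
  have hv0 : (PySem.List.pyRange 0 5 1).map (fun _ => false) = [false, false, false, false, false] := by decide
  have hs0 : PySem.Set.add PySem.Set.empty (0:Int) = [0] := by decide
  rw [hv0, hs0]
  have hinv0 : DfsInv E [0] [false, false, false, false, false] := by
    refine ⟨rfl, by simp, ?_, ?_, ?_, ?_, ?_, by simp⟩
    · intro c hc; rw [List.mem_singleton] at hc; rw [hc]; decide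
    · intro c hc; rw [List.mem_singleton] at hc; rw [hc]; decide
    · intro c hc; rw [List.mem_singleton] at hc; rw [hc]; exact Relation.ReflTransGen.refl
    · intro x hx hvx; exfalso; revert hvx; fin_cases hx <;> decide
    · intro x hx hvx; exfalso; revert hvx; fin_cases hx <;> decide
  have hfin := dfsLoop_inv hK 16 [0] [false, false, false, false, false] hinv0 (by decide)
  rw [all_iff_pvNodes hfin.len]
  constructor
  · intro hall x hx; exact (dfs_final hK hfin x hx).mp (hall x hx)
  · intro hall x hx; exact (dfs_final hK hfin x hx).mpr (hall x hx)

-- ---------- the B side: 4 relaxation passes compute exactly the reachable set ----------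

def Sfun (r : PySem.Dict Int Bool) (x : Int) : Bool := r.getD x false

def Sle (r r' : PySem.Dict Int Bool) : Prop := ∀ x, Sfun r x = true → Sfun r' x = true

def relaxStep (r : PySem.Dict Int Bool) (e : Int × Int) : PySem.Dict Int Bool :=
  let ra := r.getD e.1 false
  let rb := r.getD e.2 false
  if ra || rb then (r.insert e.1 true).insert e.2 true else r

-- the dict {i: i == 0 for i in range(5)} B starts from
def bInit : PySem.Dict Int Bool :=
  (PySem.List.pyRange 0 5 1).foldl (fun d i => d.insert i (i == 0)) PySem.Dict.empty

lemma relaxStep_eq (r : PySem.Dict Int Bool) (e : Int × Int) :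
    relaxStep r e =
      if (r.getD e.1 false || r.getD e.2 false) = true
      then (r.insert e.1 true).insert e.2 true else r := rfl

lemma relaxPass_eq_foldl (E : List (Int × Int)) (r : PySem.Dict Int Bool) :
    relaxPass E r = E.foldl relaxStep r := rfl

lemma Sfun_insert_true {r : PySem.Dict Int Bool} {a x : Int} :
    Sfun (r.insert a true) x = true ↔ (x = a ∨ Sfun r x = true) := by
  unfold Sfun
  rw [PySem.Dict.getD_insert]
  split <;> simp_all

lemma sle_relaxStep (r : PySem.Dict Int Bool) (e : Int × Int) : Sle r (relaxStep r e) := by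
  intro x hx
  rw [relaxStep_eq]
  split
  · exact Sfun_insert_true.mpr (Or.inr (Sfun_insert_true.mpr (Or.inr hx)))
  · exact hx

lemma sle_foldl (l : List (Int × Int)) :
    ∀ r, Sle r (l.foldl relaxStep r) := by
  induction l with
  | nil => intro r x hx; exact hx
  | cons e l ih =>
    intro r x hx
    exact ih (relaxStep r e) x (sle_relaxStep r e x hx)

lemma keys_relaxStep {r : PySem.Dict Int Bool} {e : Int × Int}
    (hk : r.keys = pvNodes) (he1 : e.1 ∈ pvNodes) (he2 : e.2 ∈ pvNodes) :
    (relaxStep r e).keys = pvNodes := by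
  rw [relaxStep_eq]
  split
  · have hc1 : r.contains e.1 = true := (PySem.Dict.contains_iff_mem_keys r e.1).mpr (hk ▸ he1)
    have hc2 : (r.insert e.1 true).contains e.2 = true := by
      apply (PySem.Dict.contains_iff_mem_keys _ _).mpr
      rw [PySem.Dict.keys_insert_of_contains r true hc1, hk]; exact he2
    rw [PySem.Dict.keys_insert_of_contains _ true hc2,
        PySem.Dict.keys_insert_of_contains r true hc1, hk]
  · exact hk

lemma keys_foldl {l : List (Int × Int)} (hl : ∀ e ∈ l, e.1 ∈ pvNodes ∧ e.2 ∈ pvNodes) :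
    ∀ {r : PySem.Dict Int Bool}, r.keys = pvNodes → (l.foldl relaxStep r).keys = pvNodes := by
  induction l with
  | nil => intro r hk; exact hk
  | cons e l ih =>
    intro r hk
    exact ih (fun e' he' => hl e' (by simp [he']))
      (keys_relaxStep hk (hl e (by simp)).1 (hl e (by simp)).2)

lemma Sfun_mem_keys {r : PySem.Dict Int Bool} {x : Int} (h : Sfun r x = true) :
    x ∈ r.keys := by
  by_contra hmem
  have hcx : r.contains x = false := by
    rcases hcx : r.contains x
    · rfl
    · exact absurd ((PySem.Dict.contains_iff_mem_keys r x).mp hcx) hmem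
  rw [Sfun, PySem.Dict.getD_of_not_contains r false hcx] at h
  exact absurd h (by simp)

lemma foldl_sound {E : List (Int × Int)} {G : Int → Prop}
    (hG : ∀ x y, G x → Adj E x y → G y) :
    ∀ (l : List (Int × Int)), (∀ e ∈ l, e ∈ E) →
      ∀ {r : PySem.Dict Int Bool}, (∀ x, Sfun r x = true → G x) →
        ∀ x, Sfun (l.foldl relaxStep r) x = true → G x := by
  intro l
  induction l with
  | nil => intro _ r hr x hx; exact hr x hx
  | cons e l ih =>
    intro hl r hr
    apply ih (fun e' he' => hl e' (by simp [he']))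
    intro x hx
    rw [relaxStep_eq] at hx
    split at hx
    · rename_i hcond
      have hor : Sfun r e.1 = true ∨ Sfun r e.2 = true := by
        revert hcond
        unfold Sfun
        cases r.getD e.1 false <;> cases r.getD e.2 false <;> simp
      have hadj : Adj E e.1 e.2 := ⟨e, hl e (by simp), Or.inl ⟨rfl, rfl⟩⟩
      have hG12 : G e.1 ∧ G e.2 := by
        rcases hor with h | h
        · exact ⟨hr _ h, hG _ _ (hr _ h) hadj⟩
        · exact ⟨hG _ _ (hr _ h) (adj_symm hadj), hr _ h⟩
      rcases Sfun_insert_true.mp hx with rfl | hx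
      · exact hG12.2
      · rcases Sfun_insert_true.mp hx with rfl | hx
        · exact hG12.1
        · exact hr x hx
    · exact hr x hx

lemma Sfun_relaxStep_eq {r : PySem.Dict Int Bool} {e : Int × Int}
    (hle : Sle (relaxStep r e) r) : ∀ x, Sfun (relaxStep r e) x = Sfun r x := by
  intro x
  rcases hx : Sfun (relaxStep r e) x
  · rcases hx' : Sfun r x
    · rfl
    · exact absurd (sle_relaxStep r e x hx') (by simp [hx])
  · exact (hle x hx).symm

lemma foldl_fix : ∀ (l : List (Int × Int)) (r : PySem.Dict Int Bool),
    Sle (l.foldl relaxStep r) r → ∀ e ∈ l, Sfun r e.1 = Sfun r e.2 := by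
  intro l
  induction l with
  | nil => intro r _ e he; simp at he
  | cons e l ih =>
    intro r h e' he'
    simp only [List.foldl_cons] at h
    have hstep_le : Sle (relaxStep r e) r := by
      intro x hx
      exact h x (sle_foldl l (relaxStep r e) x hx)
    have heq : ∀ x, Sfun (relaxStep r e) x = Sfun r x := Sfun_relaxStep_eq hstep_le
    rcases List.mem_cons.mp he' with rfl | he'
    · -- the head edge: if either endpoint is reached the step sets both endpoints
      by_cases hcond : (r.getD e'.1 false || r.getD e'.2 false) = true
      · have hs : relaxStep r e' = (r.insert e'.1 true).insert e'.2 true := by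
          unfold relaxStep; rw [if_pos hcond]
        have h1 : Sfun (relaxStep r e') e'.1 = true := by
          rw [hs]; exact Sfun_insert_true.mpr (Or.inr (Sfun_insert_true.mpr (Or.inl rfl)))
        have h2 : Sfun (relaxStep r e') e'.2 = true := by
          rw [hs]; exact Sfun_insert_true.mpr (Or.inl rfl)
        rw [heq e'.1] at h1; rw [heq e'.2] at h2
        rw [h1, h2]
      · have hff : Sfun r e'.1 = false ∧ Sfun r e'.2 = false := by
          revert hcond; unfold Sfun
          cases r.getD e'.1 false <;> cases r.getD e'.2 false <;> simp
        rw [hff.1, hff.2]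
    · have hhyp : Sle (l.foldl relaxStep (relaxStep r e)) (relaxStep r e) :=
        fun x hx => sle_relaxStep r e x (h x hx)
      have hres := ih (relaxStep r e) hhyp e' he'
      rw [heq e'.1, heq e'.2] at hres
      exact hres

lemma closed_complete {E : List (Int × Int)} {r : PySem.Dict Int Bool}
    (h0 : Sfun r 0 = true) (hcl : ∀ e ∈ E, Sfun r e.1 = Sfun r e.2) :
    ∀ x, Reach E 0 x → Sfun r x = true := by
  intro x hr
  induction hr with
  | refl => exact h0
  | tail _ hadj ih =>
    obtain ⟨e, he, hc⟩ := hadj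
    rcases hc with ⟨h1, h2⟩ | ⟨h1, h2⟩
    · rw [← h2, ← hcl e he, h1]; exact ih
    · rw [← h1, hcl e he, h2]; exact ih

def trueCount (r : PySem.Dict Int Bool) : Nat := pvNodes.countP (fun x => Sfun r x)

lemma trueCount_lt {r r' : PySem.Dict Int Bool} (hk' : r'.keys = pvNodes)
    (hmono : Sle r r') (hne : ¬ Sle r' r) : trueCount r < trueCount r' := by
  rw [Sle, not_forall] at hne
  obtain ⟨x, hx⟩ := hne
  rw [Classical.not_imp] at hx
  have hx1 : Sfun r' x = true := hx.1
  have hx0 : Sfun r x = false := by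
    rcases h : Sfun r x
    · rfl
    · exact absurd h hx.2
  exact countP_strict (fun y _ hy => hmono y hy) (hk' ▸ Sfun_mem_keys hx1) hx0 hx1

-- all(reach.values()) over a dict whose keys are exactly pvNodes
lemma values_all {r : PySem.Dict Int Bool} (hk : r.keys = pvNodes) :
    ((PySem.Dict.values r).all (fun b => b) = true) ↔ ∀ k ∈ pvNodes, Sfun r k = true := by
  have hnd : r.keys.Nodup := by rw [hk]; decide
  have hvals : PySem.Dict.values r = r.items.map (·.2) := rfl
  have hkeys : r.keys = r.items.map (·.1) := rfl
  rw [hvals, List.all_eq_true]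
  constructor
  · intro hall k hkm
    rw [← hk, hkeys] at hkm
    obtain ⟨p, hp, rfl⟩ := List.mem_map.mp hkm
    have hg : r.get? p.1 = some p.2 := PySem.Dict.get?_of_mem_items r (by simpa using hp) hnd
    rw [Sfun, PySem.Dict.getD_eq_get?_getD, hg]
    exact hall _ (List.mem_map.mpr ⟨p, hp, rfl⟩)
  · intro hall b hb
    obtain ⟨p, hp, rfl⟩ := List.mem_map.mp hb
    have hkm : p.1 ∈ pvNodes := by
      rw [← hk, hkeys]; exact List.mem_map.mpr ⟨p, hp, rfl⟩
    have hg : r.get? p.1 = some p.2 := PySem.Dict.get?_of_mem_items r (by simpa using hp) hnd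
    have := hall p.1 hkm
    rwa [Sfun, PySem.Dict.getD_eq_get?_getD, hg] at this

lemma B_char {E : List (Int × Int)} (hK : HK E) (hlen : E.length = 4) :
    (is_spanning_tree_alt E = true ↔ ∀ x ∈ pvNodes, Reach E 0 x) := by
  rw [is_spanning_tree_alt, hlen]
  simp only [bne_self_eq_false, Bool.false_eq_true, if_false]
  have hrg : PySem.List.pyRange 0 4 1 = [0, 1, 2, 3] := by decide
  rw [hrg]
  simp only [List.foldl_cons, List.foldl_nil, relaxPass_eq_foldl]
  rw [show ((PySem.List.pyRange 0 5 1).foldl (fun d i => d.insert i (i == 0)) PySem.Dict.empty) = bInit from rfl]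
  -- the four pass results
  have hk0 : bInit.keys = pvNodes := by decide
  have hk1 := keys_foldl hK hk0
  have hk2 := keys_foldl hK hk1
  have hk3 := keys_foldl hK hk2
  have hk4 := keys_foldl hK hk3
  have hS00 : Sfun bInit 0 = true := by decide
  have hS0 : ∀ x, Sfun bInit x = true → x = 0 := by
    intro x hx
    have hxk : x ∈ pvNodes := hk0 ▸ Sfun_mem_keys hx
    fin_cases hxk <;> revert hx <;> decide
  have hGcl : ∀ x y, Reach E 0 x → Adj E x y → Reach E 0 y :=
    fun _ _ hx ha => Relation.ReflTransGen.tail hx ha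
  have hEsub : ∀ e ∈ E, e ∈ E := fun _ h => h
  have hs0 : ∀ x, Sfun bInit x = true → Reach E 0 x :=
    fun x hx => (hS0 x hx) ▸ Relation.ReflTransGen.refl
  have hs1 := foldl_sound hGcl E hEsub hs0
  have hs2 := foldl_sound hGcl E hEsub hs1
  have hs3 := foldl_sound hGcl E hEsub hs2
  have hs4 := foldl_sound hGcl E hEsub hs3
  have hm0 := sle_foldl E bInit
  have hm1 := sle_foldl E (E.foldl relaxStep bInit)
  have hm2 := sle_foldl E (E.foldl relaxStep (E.foldl relaxStep bInit))
  have hm3 := sle_foldl E (E.foldl relaxStep (E.foldl relaxStep (E.foldl relaxStep bInit)))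
  have hcomp : ∀ x, Reach E 0 x →
      Sfun (E.foldl relaxStep (E.foldl relaxStep (E.foldl relaxStep (E.foldl relaxStep bInit)))) x = true := by
    have hfrom : ∀ r : PySem.Dict Int Bool, Sfun r 0 = true →
        (∀ e ∈ E, Sfun r e.1 = Sfun r e.2) → Sle r
          (E.foldl relaxStep (E.foldl relaxStep (E.foldl relaxStep (E.foldl relaxStep bInit)))) →
        ∀ x, Reach E 0 x →
          Sfun (E.foldl relaxStep (E.foldl relaxStep (E.foldl relaxStep (E.foldl relaxStep bInit)))) x = true := by
      intro r h0 hcl hle x hx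
      exact hle x (closed_complete h0 hcl x hx)
    by_cases hf0 : Sle (E.foldl relaxStep bInit) bInit
    · exact hfrom bInit hS00 (foldl_fix E bInit hf0)
        (fun x hx => hm3 x (hm2 x (hm1 x (hm0 x hx))))
    by_cases hf1 : Sle (E.foldl relaxStep (E.foldl relaxStep bInit)) (E.foldl relaxStep bInit)
    · exact hfrom _ (hm0 0 hS00) (foldl_fix E _ hf1) (fun x hx => hm3 x (hm2 x (hm1 x hx)))
    by_cases hf2 : Sle (E.foldl relaxStep (E.foldl relaxStep (E.foldl relaxStep bInit)))
        (E.foldl relaxStep (E.foldl relaxStep bInit))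
    · exact hfrom _ (hm1 0 (hm0 0 hS00)) (foldl_fix E _ hf2) (fun x hx => hm3 x (hm2 x hx))
    by_cases hf3 : Sle (E.foldl relaxStep (E.foldl relaxStep (E.foldl relaxStep (E.foldl relaxStep bInit))))
        (E.foldl relaxStep (E.foldl relaxStep (E.foldl relaxStep bInit)))
    · exact hfrom _ (hm2 0 (hm1 0 (hm0 0 hS00))) (foldl_fix E _ hf3) (fun x hx => hm3 x hx)
    · -- all four passes strictly enlarge the reached set: it must be all of pvNodes
      have hc0 : trueCount bInit < trueCount (E.foldl relaxStep bInit) :=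
        trueCount_lt hk1 hm0 hf0
      have hc1 := trueCount_lt hk2 hm1 hf1
      have hc2 := trueCount_lt hk3 hm2 hf2
      have hc3 := trueCount_lt hk4 hm3 hf3
      have hstart : trueCount bInit = 1 := by decide
      have hle5 : trueCount (E.foldl relaxStep (E.foldl relaxStep (E.foldl relaxStep (E.foldl relaxStep bInit)))) ≤ 5 := by
        have := List.countP_le_length (p := fun x => Sfun (E.foldl relaxStep (E.foldl relaxStep (E.foldl relaxStep (E.foldl relaxStep bInit)))) x) (l := pvNodes)
        simpa [trueCount] using this
      have hfull : trueCount (E.foldl relaxStep (E.foldl relaxStep (E.foldl relaxStep (E.foldl relaxStep bInit)))) = 5 := by omega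
      have hall : ∀ x ∈ pvNodes, Sfun (E.foldl relaxStep (E.foldl relaxStep (E.foldl relaxStep (E.foldl relaxStep bInit)))) x = true := by
        apply List.countP_eq_length.mp
        rw [show pvNodes.length = 5 from rfl]
        exact hfull
      intro x hx
      exact hall x (reach_mem hK hx)
  rw [values_all hk4]
  constructor
  · intro hall x hx; exact hs4 x (hall x hx)
  · intro hall x hx; exact hcomp x (hall x hx)

-- ===== VERDICT (by name: the statement is the Claim_ definition above) =====
theorem is_spanning_tree_spec : Claim_equal_is_spanning_tree := by
  intro edges _ hPre
  unfold Spec_is_spanning_tree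
  by_cases hlen : edges.length = 4
  · have hK : HK edges := by
      rcases hPre with h | h
      · exact absurd hlen h
      · exact h
    have hiff := (A_char hK hlen).trans (B_char hK hlen).symm
    rcases hA : is_spanning_tree edges <;> rcases hB : is_spanning_tree_alt edges <;> simp_all
  · have h1 : (edges.length != 4) = true := by simpa using hlen
    rw [is_spanning_tree, is_spanning_tree_alt, h1]
    simp
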